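-- pv_equiv track=rewrite | github.com/gmltmd23/Algorithm-Study | This is Coding Test for employment/기출문제 풀이/그리디_기출/무지의 먹방 라이브(중요, 어려움).py | solution
-- ===== SOURCE A (Python) =====
-- import heapq
--
-- def solution(food_times, k):
--     q = []
--     for i in range(len(food_times)):
--         heapq.heappush(q, (food_times[i], i + 1))
--     sum_value, previous = 0, 0
--     length = len(food_times)
--
--     while sum_value + ((q[0][0] - previous) * length) <= k:
--         now = heapq.heappop(q)[0]
--         sum_value += (now - previous) * length
--         length -= 1
--         previous = now
--
--     result = sorted(q, key = lambda x: x[1])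
--     return result[(k - sum_value) % length][1]
-- ===== SOURCE B (Python) =====
-- def solution(food_times, k):
--     n = len(food_times)
--
--     def cost(v):
--         # total seconds elapsed once every food has been eaten for at most v seconds
--         return sum(min(t, v) for t in food_times)
--
--     # binary search the largest v with cost(v) <= k; invariant cost(lo) <= k < cost(hi)
--     lo, hi = k // n, max(food_times)
--     while hi - lo > 1:
--         mid = (lo + hi) // 2
--         if cost(mid) <= k:
--             lo = mid
--         else:
--             hi = mid
--     rem = (k - cost(lo)) % sum(1 for t in food_times if t > lo)
--     for i, t in enumerate(food_times):
--         if t > lo: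
--             if rem == 0:
--                 return i + 1
--             rem -= 1
-- ===== Notes on version B (the rewrite author's own statement) =====
-- stated objective: alternative
-- what changed: Replaces A's heap simulation (pop foods one by one in ascending time order, accumulating elapsed time) by a binary search for the largest threshold v with sum(min(t, v)) <= k, then a single pass over enumerate(food_times) to pick the answer among foods with t > v; no heap, no sort.
-- outside the precondition, e.g. on solution([], 0): A raises IndexError, B raises ZeroDivisionError; on solution([1, 1], 5): A raises IndexError, B raises ZeroDivisionError
import Mathlib
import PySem

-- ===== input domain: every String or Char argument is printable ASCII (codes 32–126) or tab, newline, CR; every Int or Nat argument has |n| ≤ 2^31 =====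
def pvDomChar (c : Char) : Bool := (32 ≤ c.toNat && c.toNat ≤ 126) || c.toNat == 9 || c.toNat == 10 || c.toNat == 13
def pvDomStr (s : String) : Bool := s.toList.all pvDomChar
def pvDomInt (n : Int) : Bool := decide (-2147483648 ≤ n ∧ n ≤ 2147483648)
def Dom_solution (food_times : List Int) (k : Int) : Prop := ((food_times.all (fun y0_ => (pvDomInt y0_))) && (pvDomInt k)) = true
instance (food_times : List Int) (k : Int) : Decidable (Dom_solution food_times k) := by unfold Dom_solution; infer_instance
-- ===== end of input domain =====

-- B replaces A's heap simulation (pop foods one by one in ascending time order) by a binary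
-- search for the largest elapsed-threshold v with sum(min(t, v)) <= k; no heap and no sort
-- (objective: alternative, same practical cost).

-- ===== PORT A =====
-- heapq is ported as an exact priority queue (ordered insert, pop = head = minimum): since all
-- (time, index) pairs are distinct, heappop yields the same element as Python's heapq at every
-- step, so every value A observes (popped values, remaining multiset) coincides with Python's.
def pvTBefore (a b : Int × Int) : Bool :=
  decide (a.1 < b.1) || (!decide (b.1 < a.1) && decide (a.2 < b.2))

def pvHeappush (q : List (Int × Int)) (x : Int × Int) : List (Int × Int) :=
  PySem.List.insertBy pvTBefore x q

-- the while loop: pops the head while the condition holds; `none` = the `q[0]` IndexError branch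
def pvAWalk (q : List (Int × Int)) (length : Int) (sum_value previous k : Int) :
    Option (List (Int × Int) × Int × Int) :=
  match q with
  | [] => none
  | (t, i) :: rest =>
      if sum_value + (t - previous) * length ≤ k then
        pvAWalk rest (length - 1) (sum_value + (t - previous) * length) t k
      else
        some ((t, i) :: rest, length, sum_value)

def solution (food_times : List Int) (k : Int) : Int :=
  let q := (PySem.List.pyRange 0 (food_times.length : Int) 1).foldl
      (fun q i => pvHeappush q (PySem.List.pyGetD food_times i 0, i + 1)) []
  match pvAWalk q (food_times.length : Int) 0 0 k with
  | none => 0  -- Python raises IndexError here (excluded by Pre_)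
  | some (q', length, sum_value) =>
      let result := PySem.List.sorted q' (fun x => x.2) false
      match PySem.List.pyGet? result (PySem.Int.mod (k - sum_value) length) with
      | some p => p.2
      | none => 0

-- ===== PORT B =====
-- cost(v) = sum(min(t, v) for t in food_times)
def pvCost (food_times : List Int) (v : Int) : Int :=
  (food_times.map (fun t => min t v)).sum

-- the while loop of Source B; fuel = (hi - lo).toNat bounds the iterations (the gap shrinks by ≥ 1
-- per iteration, so the port runs the loop exactly as Python does)
def pvBSearch (food_times : List Int) (k lo hi : Int) : Nat → Int
  | 0 => lo
  | fuel + 1 =>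
      if 1 < hi - lo then
        let mid := PySem.Int.floordiv (lo + hi) 2
        if pvCost food_times mid ≤ k then pvBSearch food_times k mid hi fuel
        else pvBSearch food_times k lo mid fuel
      else lo

-- the final for loop over enumerate(food_times); Python returns None when the loop falls
-- through, which cannot happen inside Pre_ (the 0 here is never reached on admitted inputs)
def pvSelect (pairs : List (Int × Int)) (v rem : Int) : Int :=
  match pairs with
  | [] => 0
  | (i, t) :: rest =>
      if v < t then
        if rem = 0 then i + 1 else pvSelect rest v (rem - 1)
      else pvSelect rest v rem

def solution_alt (food_times : List Int) (k : Int) : Int :=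
  let n : Int := food_times.length
  let lo := PySem.Int.floordiv k n  -- Python: ZeroDivisionError when food_times = [] (excluded by Pre_)
  let hi := (PySem.List.max? food_times (fun t => t)).getD 0
  let v := pvBSearch food_times k lo hi (hi - lo).toNat
  let count : Int := (food_times.filter (fun t => decide (v < t))).length
  let rem := PySem.Int.mod (k - pvCost food_times v) count  -- Python: ZeroDivisionError when count = 0 (excluded by Pre_)
  pvSelect (PySem.List.enumerate food_times 0) v rem

-- ===== PRECONDITION & SPEC =====
-- Pre_ excludes exactly the inputs where A raises: the empty list (IndexError on q[0]) and
-- sum(food_times) ≤ k, where the heap is drained empty and q[0] raises IndexError; A never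
-- returns a value on these inputs.
def Pre_solution (food_times : List Int) (k : Int) : Prop :=
  food_times ≠ [] ∧ k < food_times.sum
instance (food_times : List Int) (k : Int) : Decidable (Pre_solution food_times k) := by
  unfold Pre_solution; infer_instance

def pvWitness_solution : List Int × Int := ([3, 1, 2], 5)

def Spec_solution (food_times : List Int) (k : Int) (out : Int) : Prop := out = solution_alt food_times k
instance (food_times : List Int) (k : Int) (out : Int) : Decidable (Spec_solution food_times k out) := by unfold Spec_solution; infer_instance

-- ===== CLAIM (what is proved, stated in full; the proofs are below) =====
def Claim_equal_solution : Prop := ∀ (food_times : List Int) (k : Int), Dom_solution food_times k → Pre_solution food_times k → Spec_solution food_times k (solution food_times k)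

-- ===== LEMMAS AND PROOFS =====

-- a fold over `range(len(xs))` that reads `xs[i]` is the fold over `enumerate(xs)`
theorem pv_range_enum_fold {β : Type} (g : β → Int → Int → β) :
    ∀ (xs : List Int) (s : Nat) (pre : List Int) (init : β), pre.length = s →
      (PySem.List.pyRange (s : Int) ((s : Int) + xs.length) 1).foldl
        (fun acc i => g acc i (PySem.List.pyGetD (pre ++ xs) i 0)) init
      = (PySem.List.enumerate xs (s : Int)).foldl (fun acc p => g acc p.1 p.2) init := by
  intro xs
  induction xs with
  | nil =>
      intro s pre init hpre
      simp [PySem.List.pyRange, PySem.List.enumerate_nil]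
  | cons x xs ihx =>
      intro s pre init hpre
      have hlt : (s : Int) < (s : Int) + ((x :: xs).length : Int) := by
        simp only [List.length_cons]
        push_cast
        omega
      rw [PySem.List.pyRange_one_cons hlt, List.foldl_cons]
      have hx : PySem.List.pyGetD (pre ++ x :: xs) ((s : Int)) 0 = x := by
        rw [PySem.List.pyGetD_natCast]
        subst hpre
        simp [List.getD]
      rw [hx, PySem.List.enumerate_cons, List.foldl_cons]
      have h := ihx (s + 1) (pre ++ [x]) (g init (s : Int) x) (by simp [hpre])
      simp only [List.append_assoc, List.singleton_append] at h
      simp only [List.length_cons] at h ⊢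
      push_cast at h ⊢
      have e1 : (s : Int) + ((xs.length : Int) + 1) = (s : Int) + 1 + (xs.length : Int) := by ring
      rw [e1]
      exact h

-- A's heap build is the stable tuple-keyed sort of the (food_time, index) pairs
theorem pv_build_eq (food_times : List Int) :
    (PySem.List.pyRange 0 (food_times.length : Int) 1).foldl
      (fun q i => pvHeappush q (PySem.List.pyGetD food_times i 0, i + 1)) []
    = PySem.List.sorted2
        ((PySem.List.enumerate food_times 0).map (fun p => (p.2, p.1 + 1)))
        (fun x => x.1) (fun x => x.2) false := by
  have h := pv_range_enum_fold (fun acc i t => PySem.List.insertBy pvTBefore (t, i + 1) acc)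
      food_times 0 [] [] rfl
  simp only [List.nil_append, Nat.cast_zero, zero_add] at h
  unfold pvHeappush
  rw [h]
  simp only [PySem.List.sorted2, List.foldl_map]
  rfl

-- the (non-strict) lexicographic order the heap list is arranged in
def pvLe (a b : Int × Int) : Prop := a.1 < b.1 ∨ (a.1 = b.1 ∧ a.2 ≤ b.2)

theorem pv_before_le {a b : Int × Int} (h : pvTBefore a b = true) : pvLe a b := by
  simp only [pvTBefore, Bool.or_eq_true, Bool.and_eq_true, Bool.not_eq_true',
    decide_eq_true_eq, decide_eq_false_iff_not] at h
  unfold pvLe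
  omega

theorem pv_not_before_le {a b : Int × Int} (h : pvTBefore a b = false) : pvLe b a := by
  simp only [pvTBefore, Bool.or_eq_false_iff, Bool.and_eq_false_iff, Bool.not_eq_false',
    decide_eq_true_eq, decide_eq_false_iff_not] at h
  unfold pvLe
  omega

theorem pv_le_trans {a b c : Int × Int} (h1 : pvLe a b) (h2 : pvLe b c) : pvLe a c := by
  unfold pvLe at *
  omega

theorem pv_insert_pairwise (x : Int × Int) :
    ∀ (l : List (Int × Int)), l.Pairwise pvLe →
      (PySem.List.insertBy pvTBefore x l).Pairwise pvLe := by
  intro l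
  induction l with
  | nil => intro _; simp [PySem.List.insertBy]
  | cons y t ih =>
      intro h
      rw [List.pairwise_cons] at h
      obtain ⟨hy, ht⟩ := h
      by_cases hb : pvTBefore x y = true
      · rw [PySem.List.insertBy, if_pos hb]
        refine List.Pairwise.cons ?_ (List.Pairwise.cons hy ht)
        intro z hz
        rcases List.mem_cons.mp hz with rfl | hz
        · exact pv_before_le hb
        · exact pv_le_trans (pv_before_le hb) (hy z hz)
      · rw [PySem.List.insertBy, if_neg hb]
        refine List.Pairwise.cons ?_ (ih ht)
        intro z hz
        rcases (PySem.List.mem_insertBy _ _ _ _).mp hz with rfl | hz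
        · exact pv_not_before_le (Bool.not_eq_true _ ▸ hb)
        · exact hy z hz

theorem pv_foldl_pairwise :
    ∀ (xs acc : List (Int × Int)), acc.Pairwise pvLe →
      (xs.foldl (fun a x => PySem.List.insertBy pvTBefore x a) acc).Pairwise pvLe := by
  intro xs
  induction xs with
  | nil => intro acc h; exact h
  | cons x xs ih => intro acc h; exact ih _ (pv_insert_pairwise x acc h)

theorem pv_sorted2_pairwise (xs : List (Int × Int)) :
    (PySem.List.sorted2 xs (fun x => x.1) (fun x => x.2) false).Pairwise pvLe :=
  pv_foldl_pairwise xs [] (List.Pairwise.nil)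

-- the while loop of A on the sorted pair list, characterised by its stopping index
theorem pv_walk_char (S : List (Int × Int)) (k : Int)
    (hk : k < (S.map Prod.fst).sum) :
    ∀ (fuel j : Nat) (prev : Int), j < S.length → S.length - j ≤ fuel →
    ∃ (j' : Nat) (p : Int) (hj' : j' < S.length),
      pvAWalk (S.drop j) ((S.length : Int) - j)
          (((S.take j).map Prod.fst).sum + prev * ((S.length : Int) - j)) prev k
        = some (S.drop j', (S.length : Int) - j',
            ((S.take j').map Prod.fst).sum + p * ((S.length : Int) - j')) ∧
      ((j' = j ∧ p = prev) ∨
        (j < j' ∧ ∃ (hp : j' - 1 < S.length), p = (S[j'-1]'hp).1 ∧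
          ((S.take j').map Prod.fst).sum + p * ((S.length : Int) - j') ≤ k)) ∧
      k < ((S.take j').map Prod.fst).sum + (S[j']'hj').1 * ((S.length : Int) - j') := by
  intro fuel
  induction fuel with
  | zero => intro j prev hj hfuel; omega
  | succ fuel ih =>
      intro j prev hj hfuel
      have hdrop : S.drop j = S[j] :: S.drop (j+1) := List.drop_eq_getElem_cons hj
      rcases hp : S[j] with ⟨t, i⟩
      rw [hp] at hdrop
      have htake : ((S.take (j+1)).map Prod.fst).sum = ((S.take j).map Prod.fst).sum + t := by
        rw [List.take_add_one]
        simp [List.getElem?_eq_getElem hj, hp]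
      have hL : ((S.take j).map Prod.fst).sum + prev * ((S.length : Int) - j)
          + (t - prev) * ((S.length : Int) - j)
          = ((S.take j).map Prod.fst).sum + t * ((S.length : Int) - j) := by ring
      rw [hdrop]
      by_cases hc : ((S.take j).map Prod.fst).sum + t * ((S.length : Int) - j) ≤ k
      · -- the loop pops S[j]
        rcases Nat.lt_or_ge (j+1) S.length with hlt | hge
        · have hrec := ih (j+1) t hlt (by omega)
          obtain ⟨j', p, hj', hwalk, hcase, hstop⟩ := hrec
          refine ⟨j', p, hj', ?_, ?_, hstop⟩
          · rw [pvAWalk, if_pos (by rw [hL]; exact hc)]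
            have e3 : ((S.take j).map Prod.fst).sum + prev * ((S.length : Int) - j)
                + (t - prev) * ((S.length : Int) - j)
                = ((S.take (j+1)).map Prod.fst).sum + t * ((S.length : Int) - ((j+1 : Nat) : Int)) := by
              rw [htake]; push_cast; ring
            have e2 : ((S.length : Int) - (j : Int) - 1) = ((S.length : Int) - ((j+1 : Nat) : Int)) := by
              push_cast; ring
            rw [e3, e2]
            exact hwalk
          · rcases hcase with ⟨rfl, hpt⟩ | ⟨hlt2, hp2, hpeq, hsle⟩
            · refine Or.inr ⟨by omega, by omega, ?_, ?_⟩
              · rw [hpt]; simp [hp]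
              · rw [hpt]
                have e4 : ((S.take (j+1)).map Prod.fst).sum + t * ((S.length : Int) - ((j+1 : Nat) : Int))
                    = ((S.take j).map Prod.fst).sum + t * ((S.length : Int) - j) := by
                  rw [htake]; push_cast; ring
                rw [e4]; exact hc
            · exact Or.inr ⟨by omega, hp2, hpeq, hsle⟩
        · -- popping the last food would need sum(food_times) ≤ k: impossible
          exfalso
          have hj1 : j + 1 = S.length := by omega
          have htot : ((S.take (j+1)).map Prod.fst).sum = (S.map Prod.fst).sum := by
            rw [hj1, List.take_length]
          have hone : ((S.length : Int) - j) = 1 := by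
            rw [← hj1]; push_cast; ring
          rw [hone, mul_one] at hc
          omega
      · -- the loop stops here
        refine ⟨j, prev, hj, ?_, Or.inl ⟨rfl, rfl⟩, ?_⟩
        · rw [pvAWalk, if_neg (by rw [hL]; exact hc)]
          rw [← hdrop]
        · simp only [hp]
          omega

-- positions m1 ≤ m2 of the arranged list carry nondecreasing food times
theorem pv_mono (S : List (Int × Int)) (hpair : S.Pairwise pvLe) :
    ∀ (m1 m2 : Nat) (h1 : m1 < S.length) (h2 : m2 < S.length), m1 ≤ m2 →
      (S[m1]'h1).1 ≤ (S[m2]'h2).1 := by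
  intro m1 m2 h1 h2 hle
  rcases eq_or_lt_of_le hle with rfl | hlt
  · exact le_refl _
  · have := (List.pairwise_iff_getElem.mp hpair) m1 m2 h1 h2 hlt
    unfold pvLe at this
    omega

-- the elapsed-time sum, split at a position that separates times ≤ v from times ≥ v
theorem pv_cost_sum_eq (S : List (Int × Int)) (v : Int) (j' : Nat) (hj' : j' ≤ S.length)
    (hlo : ∀ (m : Nat) (h : m < j'), (S[m]'(Nat.lt_of_lt_of_le h hj')).1 ≤ v)
    (hhi : ∀ (m : Nat) (h : m < S.length), j' ≤ m → v ≤ (S[m]'h).1) :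
    (S.map (fun q => min q.1 v)).sum
      = ((S.take j').map Prod.fst).sum + v * ((S.length : Int) - j') := by
  have h1 : (S.take j').map (fun q => min q.1 v) = (S.take j').map Prod.fst := by
    apply List.map_congr_left
    intro q hq
    obtain ⟨m, hm, rfl⟩ := List.getElem_of_mem hq
    rw [List.getElem_take]
    have hmj : m < j' := by
      have := hm; rw [List.length_take] at this; omega
    exact min_eq_left (hlo m hmj)
  have h2 : (S.drop j').map (fun q => min q.1 v) = (S.drop j').map (fun _ => v) := by
    apply List.map_congr_left
    intro q hq
    obtain ⟨m, hm, rfl⟩ := List.getElem_of_mem hq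
    rw [List.getElem_drop]
    have hml : j' + m < S.length := by
      have := hm; rw [List.length_drop] at this; omega
    exact min_eq_right (hhi (j' + m) hml (by omega))
  conv_lhs => rw [← List.take_append_drop j' S]
  rw [List.map_append, List.sum_append, h1, h2, List.map_const', List.sum_replicate,
    List.length_drop]
  have : ((S.length - j' : Nat) : Int) = (S.length : Int) - j' := by omega
  rw [nsmul_eq_mul, this]
  ring

theorem pv_cost_mono (ft : List Int) {v w : Int} (h : v ≤ w) : pvCost ft v ≤ pvCost ft w := by
  unfold pvCost
  induction ft with
  | nil => simp
  | cons t ts ih =>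
      simp only [List.map_cons, List.sum_cons]
      exact add_le_add (min_le_min le_rfl h) ih

theorem pv_cost_le (ft : List Int) (v : Int) : pvCost ft v ≤ v * ft.length := by
  unfold pvCost
  induction ft with
  | nil => simp
  | cons t ts ih =>
      simp only [List.map_cons, List.sum_cons, List.length_cons]
      have h1 : min t v ≤ v := min_le_right t v
      push_cast
      nlinarith [ih]

theorem pv_cost_total (ft : List Int) (m : Int) (hm : ∀ t ∈ ft, t ≤ m) : pvCost ft m = ft.sum := by
  unfold pvCost
  rw [List.map_congr_left (fun t ht => min_eq_left (hm t ht))]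
  simp

-- the binary search returns a v with cost(v) ≤ k < cost(v+1)
theorem pv_bsearch_spec (ft : List Int) (k : Int) :
    ∀ (fuel : Nat) (lo hi : Int), pvCost ft lo ≤ k → k < pvCost ft hi → lo < hi →
      hi - lo ≤ (fuel : Int) →
      pvCost ft (pvBSearch ft k lo hi fuel) ≤ k ∧
        k < pvCost ft (pvBSearch ft k lo hi fuel + 1) := by
  intro fuel
  induction fuel with
  | zero => intro lo hi h1 h2 h3 h4; exfalso; simp at h4; omega
  | succ fuel ih =>
      intro lo hi h1 h2 h3 h4
      rw [pvBSearch]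
      by_cases hgap : 1 < hi - lo
      · rw [if_pos hgap]
        have hmid1 : lo + 1 ≤ PySem.Int.floordiv (lo + hi) 2 := by
          rw [PySem.Int.le_floordiv_iff_mul_le (by norm_num)]; omega
        have hmid2 : PySem.Int.floordiv (lo + hi) 2 < hi := by
          rw [PySem.Int.floordiv_lt_iff_lt_mul (by norm_num)]; omega
        by_cases hc : pvCost ft (PySem.Int.floordiv (lo + hi) 2) ≤ k
        · simp only [hc, if_true]
          exact ih _ _ hc h2 (by omega) (by omega)
        · simp only [hc, if_false]
          exact ih _ _ h1 (lt_of_not_ge hc) (by omega) (by omega)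
      · rw [if_neg hgap]
        have he : hi = lo + 1 := by omega
        exact ⟨h1, he ▸ h2⟩

theorem pv_pyGet?_cons_pos {α : Type} (x : α) (xs : List α) (r : Int) (hr : 0 < r) :
    PySem.List.pyGet? (x :: xs) r = PySem.List.pyGet? xs (r - 1) := by
  obtain ⟨n, rfl⟩ : ∃ n : Nat, r = (n : Int) + 1 := ⟨(r - 1).toNat, by omega⟩
  have h1 : ((n : Int) + 1) - 1 = ((n : Nat) : Int) := by ring
  rw [h1, show ((n : Int) + 1) = ((n + 1 : Nat) : Int) by push_cast; ring,
    PySem.List.pyGet?_natCast, PySem.List.pyGet?_natCast]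
  simp

theorem pv_pyGet?_zero_cons {α : Type} (x : α) (xs : List α) :
    PySem.List.pyGet? (x :: xs) 0 = some x := by
  rw [show (0 : Int) = ((0 : Nat) : Int) from rfl, PySem.List.pyGet?_natCast]
  simp

theorem pv_pyGet?_map_nonneg {α β : Type} (g : α → β) (l : List α) (r : Int) (hr : 0 ≤ r) :
    PySem.List.pyGet? (l.map g) r = (PySem.List.pyGet? l r).map g := by
  obtain ⟨n, rfl⟩ : ∃ n : Nat, r = (n : Int) := ⟨r.toNat, by omega⟩
  rw [PySem.List.pyGet?_natCast, PySem.List.pyGet?_natCast, List.getElem?_map]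

-- B's selection loop picks the rem-th index (1-based) among the foods with time > v
theorem pv_select_eq (v : Int) :
    ∀ (l : List (Int × Int)) (r : Int), 0 ≤ r →
      pvSelect l v r
        = (match PySem.List.pyGet?
              ((l.filter (fun q => decide (v < q.2))).map (fun q => q.1 + 1)) r with
           | some x => x
           | none => 0) := by
  intro l
  induction l with
  | nil =>
      intro r hr
      obtain ⟨n, rfl⟩ : ∃ n : Nat, r = (n : Int) := ⟨r.toNat, by omega⟩
      simp [pvSelect, PySem.List.pyGet?_natCast]
  | cons q rest ih =>
      rcases q with ⟨i, t⟩
      intro r hr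
      by_cases hv : v < t
      · simp only [pvSelect, List.filter_cons, decide_eq_true_eq, hv, if_pos, List.map_cons]
        by_cases hr0 : r = 0
        · subst hr0
          rw [if_pos rfl, pv_pyGet?_zero_cons]
        · rw [if_neg hr0, pv_pyGet?_cons_pos _ _ r (by omega), ih (r - 1) (by omega)]
      · simp only [pvSelect, List.filter_cons, decide_eq_true_eq, hv, if_neg, not_false_iff]
        exact ih r hr

-- the main equivalence on admitted inputs
theorem pv_solution_eq (ft : List Int) (k : Int) (hne : ft ≠ []) (hk : k < ft.sum) :
    solution ft k = solution_alt ft k := by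
  have hn : 0 < ft.length := List.length_pos_iff.mpr hne
  set M1 := (PySem.List.enumerate ft 0).map (fun p => (p.2, p.1 + 1)) with hM1
  set S := PySem.List.sorted2 M1 (fun x => x.1) (fun x => x.2) false with hS
  have hperm : S.Perm M1 := PySem.List.sorted2_perm M1 _ _ false
  have hft : M1.map Prod.fst = ft := by
    rw [hM1, List.map_map]
    exact PySem.List.map_snd_enumerate ft 0
  have hlen : S.length = ft.length := by
    rw [hperm.length_eq, hM1, List.length_map, PySem.List.length_enumerate]
  have hpair : S.Pairwise pvLe := pv_sorted2_pairwise M1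
  have hmono := pv_mono S hpair
  have hsum : (S.map Prod.fst).sum = ft.sum := by
    rw [(hperm.map Prod.fst).sum_eq, hft]
  have hcostS : ∀ w, (S.map (fun q => min q.1 w)).sum = pvCost ft w := by
    intro w
    rw [(hperm.map (fun q => min q.1 w)).sum_eq]
    unfold pvCost
    conv_rhs => rw [← hft, List.map_map]
    rfl
  -- B-side setup
  obtain ⟨mx, hmx⟩ : ∃ m, PySem.List.max? ft (fun t => t) = some m := by
    rcases h : PySem.List.max? ft (fun t => t) with _ | m
    · exact absurd ((PySem.List.max?_eq_none_iff ft _).mp h) hne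
    · exact ⟨m, rfl⟩
  have hmxmax : ∀ t ∈ ft, t ≤ mx := PySem.List.max?_isMax hmx
  have hcostmx : pvCost ft mx = ft.sum := pv_cost_total ft mx hmxmax
  have hnpos : (0 : Int) < (ft.length : Int) := by exact_mod_cast hn
  have hlo0le : pvCost ft (PySem.Int.floordiv k (ft.length : Int)) ≤ k := by
    have h1 := pv_cost_le ft (PySem.Int.floordiv k (ft.length : Int))
    have h2 := PySem.Int.floordiv_mul_add_mod k (ft.length : Int)
    have h3 := PySem.Int.mod_nonneg k hnpos
    omega
  have hhiK : k < pvCost ft mx := by rw [hcostmx]; exact hk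
  have hlohi : PySem.Int.floordiv k (ft.length : Int) < mx := by
    by_contra h
    push_neg at h
    exact absurd (le_trans (pv_cost_mono ft h) hlo0le) (not_le.mpr hhiK)
  obtain ⟨hv1, hv2⟩ := pv_bsearch_spec ft k (mx - PySem.Int.floordiv k (ft.length : Int)).toNat
    (PySem.Int.floordiv k (ft.length : Int)) mx hlo0le hhiK hlohi (by omega)
  set v := pvBSearch ft k (PySem.Int.floordiv k (ft.length : Int)) mx
      (mx - PySem.Int.floordiv k (ft.length : Int)).toNat with hvdef
  -- A-side walk
  obtain ⟨j', p, hj', hwalk, hcase, hstop⟩ :=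
    pv_walk_char S k (by rw [hsum]; exact hk) S.length 0 0 (by omega) (by omega)
  simp only [List.drop_zero, List.take_zero, List.map_nil, List.sum_nil, Nat.cast_zero,
    sub_zero, zero_mul, add_zero] at hwalk
  have hLpos : (0 : Int) < (S.length : Int) - j' := by
    have : (j' : Int) < (S.length : Int) := by exact_mod_cast hj'
    omega
  -- every position before the stop has time ≤ v, every position from it on has time > v
  have hple : ∀ (m : Nat) (hm : m < j'), (S[m]'(Nat.lt_trans hm hj')).1 ≤ v := by
    intro m hm
    rcases hcase with ⟨hj0, _⟩ | ⟨hpos, hp2, hpeq, hsle⟩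
    · omega
    · have hcostp : (S.map (fun q => min q.1 p)).sum
          = ((S.take j').map Prod.fst).sum + p * ((S.length : Int) - j') := by
        apply pv_cost_sum_eq S p j' (le_of_lt hj')
        · intro m2 h2
          rw [hpeq]
          exact hmono m2 (j' - 1) _ hp2 (by omega)
        · intro m2 h2 hle2
          rw [hpeq]
          exact hmono (j' - 1) m2 hp2 h2 (by omega)
      have hcpk : pvCost ft p ≤ k := by
        rw [← hcostS p, hcostp]; exact hsle
      have hpv : p ≤ v := by
        by_contra hcon
        push_neg at hcon
        have : pvCost ft (v + 1) ≤ pvCost ft p := pv_cost_mono ft (by omega)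
        omega
      calc (S[m]'(Nat.lt_trans hm hj')).1 ≤ p := by
            rw [hpeq]; exact hmono m (j' - 1) _ hp2 (by omega)
        _ ≤ v := hpv
  have hvlt : v < (S[j']'hj').1 := by
    have hcostn : (S.map (fun q => min q.1 (S[j']'hj').1)).sum
        = ((S.take j').map Prod.fst).sum + (S[j']'hj').1 * ((S.length : Int) - j') := by
      apply pv_cost_sum_eq S _ j' (le_of_lt hj')
      · intro m2 h2
        exact hmono m2 j' _ hj' (by omega)
      · intro m2 h2 hle2
        exact hmono j' m2 hj' h2 hle2
    have hckn : k < pvCost ft (S[j']'hj').1 := by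
      rw [← hcostS, hcostn]; exact hstop
    by_contra hcon
    push_neg at hcon
    have h7 : pvCost ft (S[j']'hj').1 ≤ pvCost ft v := pv_cost_mono ft hcon
    omega
  have hgt : ∀ (m : Nat) (hm : m < S.length), j' ≤ m → v < (S[m]'hm).1 := by
    intro m hm hle2
    exact lt_of_lt_of_le hvlt (hmono j' m hj' hm hle2)
  have hcostv : (S.map (fun q => min q.1 v)).sum
      = ((S.take j').map Prod.fst).sum + v * ((S.length : Int) - j') := by
    apply pv_cost_sum_eq S v j' (le_of_lt hj') hple
    intro m2 h2 hle2
    exact le_of_lt (hgt m2 h2 hle2)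
  -- the number of remaining foods
  have hcount : (ft.filter (fun t => decide (v < t))).length = S.length - j' := by
    rw [← List.countP_eq_length_filter]
    have h2 : List.countP (fun t => decide (v < t)) ft
        = List.countP (fun q => decide (v < q.1)) M1 := by
      conv_lhs => rw [← hft]
      rw [List.countP_map]
      rfl
    rw [h2, ← (List.Perm.countP_eq _ hperm)]
    conv_lhs => rw [← List.take_append_drop j' S]
    rw [List.countP_append]
    have h3 : List.countP (fun q => decide (v < q.1)) (S.take j') = 0 := by
      apply List.countP_eq_zero.mpr
      intro q hq
      obtain ⟨m, hm, rfl⟩ := List.getElem_of_mem hq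
      have hmj : m < j' := by have := hm; rw [List.length_take] at this; omega
      rw [List.getElem_take]
      simp only [decide_eq_true_eq, not_lt]
      exact hple m hmj
    have h4 : List.countP (fun q => decide (v < q.1)) (S.drop j') = (S.drop j').length := by
      apply List.countP_eq_length.mpr
      intro q hq
      obtain ⟨m, hm, rfl⟩ := List.getElem_of_mem hq
      have hml : j' + m < S.length := by have := hm; rw [List.length_drop] at this; omega
      rw [List.getElem_drop]
      simp only [decide_eq_true_eq]
      exact hgt (j' + m) hml (by omega)
    rw [h3, h4, List.length_drop]
    omega
  -- the remaining pair list, in index order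
  set E := ((PySem.List.enumerate ft 0).filter (fun q => decide (v < q.2))).map
      (fun p => (p.2, p.1 + 1)) with hE
  have hEperm : E.Perm (S.drop j') := by
    have hMf : M1.filter (fun q => decide (v < q.1)) = E := by
      rw [hM1, hE, List.filter_map]
      rfl
    have hSf : S.filter (fun q => decide (v < q.1)) = S.drop j' := by
      conv_lhs => rw [← List.take_append_drop j' S]
      rw [List.filter_append]
      have h5 : List.filter (fun q => decide (v < q.1)) (S.take j') = [] := by
        apply List.filter_eq_nil_iff.mpr
        intro q hq
        obtain ⟨m, hm, rfl⟩ := List.getElem_of_mem hq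
        have hmj : m < j' := by have := hm; rw [List.length_take] at this; omega
        rw [List.getElem_take]
        simp only [decide_eq_true_eq, not_lt]
        exact hple m hmj
      have h6 : List.filter (fun q => decide (v < q.1)) (S.drop j') = S.drop j' := by
        apply List.filter_eq_self.mpr
        intro q hq
        obtain ⟨m, hm, rfl⟩ := List.getElem_of_mem hq
        have hml : j' + m < S.length := by have := hm; rw [List.length_drop] at this; omega
        rw [List.getElem_drop]
        simp only [decide_eq_true_eq]
        exact hgt (j' + m) hml (by omega)
      rw [h5, h6, List.nil_append]
    have hps := (hperm.filter (fun q => decide (v < q.1))).symm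
    rw [hMf, hSf] at hps
    exact hps
  have hEpair : E.Pairwise (fun a b => a.2 < b.2) := by
    rw [hE]
    refine (List.pairwise_map).mpr ?_
    refine ((PySem.List.pairwise_lt_enumerate ft 0).filter _).imp ?_
    intro a b h
    simpa using h
  have hsortedE : PySem.List.sorted (S.drop j') (fun x => x.2) false = E :=
    PySem.List.sorted_eq_of_perm_of_pairwise_lt (S.drop j') E (fun x => x.2) hEperm hEpair
  -- the two remainder indices coincide
  have hcostv' : pvCost ft v = ((S.take j').map Prod.fst).sum + v * ((S.length : Int) - j') := by
    rw [← hcostS v, hcostv]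
  have hpmul : ((S.take j').map Prod.fst).sum + p * ((S.length : Int) - j')
      = pvCost ft v + (p - v) * ((S.length : Int) - j') := by
    rw [hcostv']; ring
  have hcountZ : ((ft.filter (fun t => decide (v < t))).length : Int)
      = (S.length : Int) - j' := by
    rw [hcount]; omega
  have hmodeq : PySem.Int.mod
        (k - (((S.take j').map Prod.fst).sum + p * ((S.length : Int) - j')))
        ((S.length : Int) - j')
      = PySem.Int.mod (k - pvCost ft v)
        ((ft.filter (fun t => decide (v < t))).length : Int) := by
    rw [hcountZ, PySem.Int.mod_eq_emod_of_pos hLpos, PySem.Int.mod_eq_emod_of_pos hLpos, hpmul]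
    have : k - (pvCost ft v + (p - v) * ((S.length : Int) - j'))
        = (k - pvCost ft v) + ((S.length : Int) - j') * (v - p) := by ring
    rw [this, Int.add_mul_emod_self_left]
  -- reduce A
  show (match pvAWalk
        ((PySem.List.pyRange 0 (ft.length : Int) 1).foldl
          (fun q i => pvHeappush q (PySem.List.pyGetD ft i 0, i + 1)) [])
        (ft.length : Int) 0 0 k with
      | none => 0
      | some (q', length, sum_value) =>
          match PySem.List.pyGet? (PySem.List.sorted q' (fun x => x.2) false)
              (PySem.Int.mod (k - sum_value) length) with
          | some p => p.2
          | none => 0) = solution_alt ft k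
  rw [pv_build_eq ft, ← hM1, ← hS, show ((ft.length : Int)) = ((S.length : Int)) by rw [hlen],
    hwalk]
  simp only []
  rw [hsortedE, hmodeq]
  -- reduce B
  have halt : solution_alt ft k = pvSelect (PySem.List.enumerate ft 0) v
      (PySem.Int.mod (k - pvCost ft v) ((ft.filter (fun t => decide (v < t))).length : Int)) := by
    unfold solution_alt
    rw [hmx]
    rfl
  rw [halt]
  set rem := PySem.Int.mod (k - pvCost ft v)
      ((ft.filter (fun t => decide (v < t))).length : Int) with hrem
  have hremnn : 0 ≤ rem := by
    rw [hrem, hcountZ]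
    exact PySem.Int.mod_nonneg _ hLpos
  rw [pv_select_eq v (PySem.List.enumerate ft 0) rem hremnn]
  have hmapE : ((( PySem.List.enumerate ft 0).filter (fun q => decide (v < q.2))).map
      (fun q => q.1 + 1)) = E.map (fun q => q.2) := by
    rw [hE, List.map_map]
    rfl
  rw [hmapE, pv_pyGet?_map_nonneg _ E rem hremnn]
  rcases h : PySem.List.pyGet? E rem with _ | q
  · rfl
  · rfl

-- ===== VERDICT (by name: the statement is the Claim_ definition above) =====
theorem solution_spec : Claim_equal_solution := by
  intro food_times k _ hpre
  unfold Spec_solution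
  exact pv_solution_eq food_times k hpre.1 hpre.2
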